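-- pv_equiv track=rewrite | github.com/maroon-scorch/Local-Rational-Invariants | nd/vertex_link.py | vec_to_index
-- ===== SOURCE A (Python) =====
-- def vec_to_index(vec):
--     # vec is a list of integers
--     item = vec.copy()
--
--     if 1 in item:
--         index = item.index(1)
--         item[index] = 0
--         if all(v == 0 for v in item):
--             return 2*index + 1
--         else:
--             return -1
--     elif -1 in item:
--         index = item.index(-1)
--         item[index] = 0
--         if all(v == 0 for v in item):
--             return 2*index + 2
--         else:
--             return -1
--     else:
--         return -1
-- ===== SOURCE B (Python) =====
-- def vec_to_index(vec):
--     # single pass: count nonzeros, remember last nonzero's index and value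
--     count = 0
--     idx = -1
--     val = 0
--     for i, v in enumerate(vec):
--         if v != 0:
--             count += 1
--             idx = i
--             val = v
--     if count == 1:
--         if val == 1:
--             return 2 * idx + 1
--         if val == -1:
--             return 2 * idx + 2
--     return -1
-- ===== Notes on version B (the rewrite author's own statement) =====
-- stated objective: simpler
-- what changed: Replaces A's four scans (membership test, .index, copy-and-zero, all-zero check) over two prioritized branches with one enumerate pass that counts nonzeros and keeps the last one's index and value, deciding the result after the loop.
import Mathlib
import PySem

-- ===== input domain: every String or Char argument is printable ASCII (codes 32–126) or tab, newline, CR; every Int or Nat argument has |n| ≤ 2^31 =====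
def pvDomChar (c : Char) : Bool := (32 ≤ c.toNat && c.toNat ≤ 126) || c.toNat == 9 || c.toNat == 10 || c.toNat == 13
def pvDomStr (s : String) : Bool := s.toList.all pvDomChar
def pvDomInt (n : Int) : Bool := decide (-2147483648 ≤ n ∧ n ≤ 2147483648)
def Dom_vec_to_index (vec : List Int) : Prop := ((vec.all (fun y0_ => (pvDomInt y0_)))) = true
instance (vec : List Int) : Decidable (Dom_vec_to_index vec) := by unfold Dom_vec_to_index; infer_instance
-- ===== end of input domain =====

-- B replaces A's four scans (membership, .index, zero-out, all-zero check) in two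
-- prioritized branches by one enumerate pass keeping a nonzero count and the last
-- nonzero's index and value (objective: simpler).

-- ===== PORT A =====
def vec_to_index (vec : List Int) : Int :=
  let item := vec
  if (1 : Int) ∈ item then
    match PySem.List.index? item 1 with
    | some index =>
      let item := item.set index 0
      if item.all (fun v => v == 0) then 2 * (index : Int) + 1 else -1
    | none => -1  -- unreachable: membership just held
  else if (-1 : Int) ∈ item then
    match PySem.List.index? item (-1) with
    | some index =>
      let item := item.set index 0
      if item.all (fun v => v == 0) then 2 * (index : Int) + 2 else -1
    | none => -1  -- unreachable: membership just held
  else -1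

-- ===== PORT B =====
-- loop body of B's single enumerate pass; state = (count, idx, val)
def vtiStep (st : Int × Int × Int) (p : Int × Int) : Int × Int × Int :=
  if p.2 ≠ 0 then (st.1 + 1, p.1, p.2) else st

def vec_to_index_alt (vec : List Int) : Int :=
  let st := (PySem.List.enumerate vec).foldl vtiStep ((0 : Int), (-1 : Int), (0 : Int))
  if st.1 = 1 then
    if st.2.2 = 1 then 2 * st.2.1 + 1
    else if st.2.2 = -1 then 2 * st.2.1 + 2
    else -1
  else -1

-- ===== PRECONDITION & SPEC =====
def Spec_vec_to_index (vec : List Int) (out : Int) : Prop := out = vec_to_index_alt vec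
instance (vec : List Int) (out : Int) : Decidable (Spec_vec_to_index vec out) := by unfold Spec_vec_to_index; infer_instance

-- ===== CLAIM (what is proved, stated in full; the proofs are below) =====
def Claim_equal_vec_to_index : Prop := ∀ (vec : List Int), Dom_vec_to_index vec → Spec_vec_to_index vec (vec_to_index vec)

-- ===== LEMMAS AND PROOFS =====

-- recursive characterization of the common value
def gAux : List Int → Int
  | [] => -1
  | v :: t =>
    if v = 0 then (if gAux t = -1 then -1 else gAux t + 2)
    else if t.all (fun x => x == 0) then
      (if v = 1 then 1 else if v = -1 then 2 else -1)
    else -1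

theorem gAux_lb (t : List Int) : gAux t = -1 ∨ 1 ≤ gAux t := by
  induction t with
  | nil => left; rfl
  | cons v t ih =>
    simp only [gAux]
    split_ifs <;> rcases ih with h | h <;> omega

-- the post-loop decision of B
def vtiFinish (st : Int × Int × Int) : Int :=
  if st.1 = 1 then
    if st.2.2 = 1 then 2 * st.2.1 + 1
    else if st.2.2 = -1 then 2 * st.2.1 + 2
    else -1
  else -1

theorem count_mono (l : List (Int × Int)) (st : Int × Int × Int) :
    st.1 ≤ (l.foldl vtiStep st).1 := by
  induction l generalizing st with
  | nil => exact le_refl _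
  | cons p l ih =>
    simp only [List.foldl]
    refine le_trans ?_ (ih _)
    simp only [vtiStep]; split_ifs <;> omega

theorem loop_ge_two (l : List (Int × Int)) (st : Int × Int × Int) (h : 2 ≤ st.1) :
    vtiFinish (l.foldl vtiStep st) = -1 := by
  have := count_mono l st
  simp only [vtiFinish]
  rw [if_neg (by omega)]

theorem loop_one (t : List Int) : ∀ (s j w : Int),
    vtiFinish ((PySem.List.enumerate t s).foldl vtiStep (1, j, w)) =
      if t.all (fun x => x == 0) then
        (if w = 1 then 2 * j + 1 else if w = -1 then 2 * j + 2 else -1)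
      else -1 := by
  induction t with
  | nil => intro s j w; simp [PySem.List.enumerate_nil, vtiFinish, List.all]
  | cons u t ih =>
    intro s j w
    rw [PySem.List.enumerate_cons]
    by_cases hu : u = 0
    · subst hu
      have hstep : vtiStep (1, j, w) ((s : Int), (0 : Int)) = (1, j, w) := by
        simp [vtiStep]
      rw [List.foldl_cons, hstep, ih]
      simp
    · have hstep : vtiStep (1, j, w) ((s : Int), u) = (2, s, u) := by
        simp [vtiStep, hu]
      rw [List.foldl_cons, hstep, loop_ge_two _ _ (by norm_num)]
      simp [List.all_cons, hu]

theorem loop_zero (t : List Int) : ∀ (s j w : Int),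
    vtiFinish ((PySem.List.enumerate t s).foldl vtiStep (0, j, w)) =
      if gAux t = -1 then -1 else gAux t + 2 * s := by
  induction t with
  | nil => intro s j w; simp [PySem.List.enumerate_nil, vtiFinish, gAux]
  | cons v t ih =>
    intro s j w
    rw [PySem.List.enumerate_cons]
    by_cases hv : v = 0
    · subst hv
      have hstep : vtiStep (0, j, w) ((s : Int), (0 : Int)) = (0, j, w) := by
        simp [vtiStep]
      rw [List.foldl_cons, hstep, ih]
      have hg : gAux (0 :: t) = if gAux t = -1 then -1 else gAux t + 2 := by
        simp [gAux]
      rw [hg]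
      rcases gAux_lb t with h | h
      · simp [h]
      · simp only [if_neg (show ¬ gAux t = -1 by omega)]
        rw [if_neg (show ¬ gAux t + 2 = -1 by omega)]
        ring
    · have hstep : vtiStep (0, j, w) ((s : Int), v) = (1, s, v) := by
        simp [vtiStep, hv]
      rw [List.foldl_cons, hstep, loop_one]
      simp only [gAux, if_neg hv]
      by_cases hall : t.all (fun x => x == 0)
      · rw [if_pos hall, if_pos hall]
        by_cases h1 : v = 1
        · subst h1; norm_num; ring
        · rw [if_neg h1, if_neg h1]
          by_cases hm1 : v = -1
          · subst hm1; norm_num; ring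
          · simp [hm1]
      · simp [hall]

theorem alt_eq_gAux (vec : List Int) : vec_to_index_alt vec = gAux vec := by
  show vtiFinish ((PySem.List.enumerate vec).foldl vtiStep (0, -1, 0)) = gAux vec
  rw [loop_zero]
  rcases gAux_lb vec with h | h
  · simp [h]
  · rw [if_neg (by omega)]; ring

-- A on a cons with zero head shifts the tail's result by 2 (when not -1)
theorem A_cons_zero (t : List Int) :
    vec_to_index (0 :: t) = if vec_to_index t = -1 then -1 else vec_to_index t + 2 := by
  simp only [vec_to_index]
  by_cases h1 : (1 : Int) ∈ t
  · rw [if_pos (by simp [h1] : (1 : Int) ∈ 0 :: t), if_pos h1]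
    rcases Option.isSome_iff_exists.1 ((PySem.List.index?_isSome_iff t 1).2 h1) with ⟨i, hi⟩
    rw [PySem.List.index?_cons_of_ne (x := (0 : Int)) (v := 1) t (by norm_num), hi]
    simp only [Option.map_some, List.set_cons_succ, List.all_cons, BEq.rfl, Bool.true_and]
    split_ifs <;> push_cast <;> omega
  · rw [if_neg (by simp [h1] : ¬ (1 : Int) ∈ 0 :: t), if_neg h1]
    by_cases hm1 : (-1 : Int) ∈ t
    · rw [if_pos (by simp [hm1] : (-1 : Int) ∈ 0 :: t), if_pos hm1]
      rcases Option.isSome_iff_exists.1 ((PySem.List.index?_isSome_iff t (-1)).2 hm1) with ⟨i, hi⟩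
      rw [PySem.List.index?_cons_of_ne (x := (0 : Int)) (v := -1) t (by norm_num), hi]
      simp only [Option.map_some, List.set_cons_succ, List.all_cons, BEq.rfl, Bool.true_and]
      split_ifs <;> push_cast <;> omega
    · rw [if_neg (by simp [hm1] : ¬ (-1 : Int) ∈ 0 :: t), if_neg hm1]
      rfl

-- a nonzero element in t refutes the all-zero test
theorem not_all_of_mem {t : List Int} {w : Int} (hw : w ∈ t) (hnz : w ≠ 0) :
    ¬ (t.all (fun x => x == 0) = true) := by
  simp only [List.all_eq_true]
  intro h
  have := h w hw
  simp [hnz] at this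

theorem a_eq_gAux (vec : List Int) : vec_to_index vec = gAux vec := by
  induction vec with
  | nil => rfl
  | cons v t ih =>
    by_cases hv : v = 0
    · subst hv
      rw [A_cons_zero, ih]
      simp [gAux]
    · simp only [vec_to_index, gAux, if_neg hv]
      by_cases h1 : v = 1
      · subst h1
        rw [if_pos List.mem_cons_self, PySem.List.index?_cons_self]
        simp only [List.set_cons_zero, List.all_cons, BEq.rfl, Bool.true_and]
        norm_num
      · by_cases hm1 : v = -1
        · subst hm1
          by_cases ht1 : (1 : Int) ∈ t
          · rw [if_pos (by simp [ht1] : (1 : Int) ∈ -1 :: t)]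
            rw [PySem.List.index?_cons_of_ne (x := (-1 : Int)) (v := 1) t (by norm_num)]
            rcases Option.isSome_iff_exists.1 ((PySem.List.index?_isSome_iff t 1).2 ht1) with ⟨i, hi⟩
            rw [hi]
            simp only [Option.map_some, List.set_cons_succ, List.all_cons]
            have hall := not_all_of_mem ht1 (show (1 : Int) ≠ 0 by norm_num)
            simp [hall]
          · rw [if_neg (by simp [ht1] : ¬ (1 : Int) ∈ -1 :: t),
                if_pos List.mem_cons_self, PySem.List.index?_cons_self]
            simp only [List.set_cons_zero, List.all_cons, BEq.rfl, Bool.true_and]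
            norm_num
        · -- v ∉ {0, 1, -1}
          by_cases ht1 : (1 : Int) ∈ t
          · rw [if_pos (by simp [ht1] : (1 : Int) ∈ v :: t)]
            rw [PySem.List.index?_cons_of_ne (x := v) (v := 1) t h1]
            rcases Option.isSome_iff_exists.1 ((PySem.List.index?_isSome_iff t 1).2 ht1) with ⟨i, hi⟩
            rw [hi]
            simp only [Option.map_some, List.set_cons_succ, List.all_cons]
            have hall := not_all_of_mem ht1 (show (1 : Int) ≠ 0 by norm_num)
            simp [hall, hv]
          · rw [if_neg (by simp [ht1, Ne.symm h1] : ¬ (1 : Int) ∈ v :: t)]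
            by_cases htm1 : (-1 : Int) ∈ t
            · rw [if_pos (by simp [htm1] : (-1 : Int) ∈ v :: t)]
              rw [PySem.List.index?_cons_of_ne (x := v) (v := -1) t hm1]
              rcases Option.isSome_iff_exists.1 ((PySem.List.index?_isSome_iff t (-1)).2 htm1) with ⟨i, hi⟩
              rw [hi]
              simp only [Option.map_some, List.set_cons_succ, List.all_cons]
              have hall := not_all_of_mem htm1 (show (-1 : Int) ≠ 0 by norm_num)
              simp [hall, hv]
            · rw [if_neg (by simp [htm1, Ne.symm hm1] : ¬ (-1 : Int) ∈ v :: t)]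
              simp [h1, hm1]

-- ===== VERDICT (by name: the statement is the Claim_ definition above) =====
theorem vec_to_index_spec : Claim_equal_vec_to_index := by
  intro vec _
  show vec_to_index vec = vec_to_index_alt vec
  rw [a_eq_gAux, alt_eq_gAux]
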